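-- pv_equiv track=rewrite | github.com/BychkovArthur/algorithms | yandex-algorithm-training-1.0/contest-5/e.py | solution
-- ===== SOURCE A (Python) =====
-- def solution(nums, n, k):
--     from collections import defaultdict
--     left = 0
--     right = 0
--     current_nums = defaultdict(int)
--     current_nums[nums[0]] = 1
--     min_len = n
--     ans_left = 1
--     ans_right = n
--     while True:
--         if len(current_nums) == k:
--             if right - left + 1 < min_len:
--                 min_len = right - left + 1
--                 ans_left = left + 1
--                 ans_right = right + 1
--
--         if left == right and right < n - 1:
--             right += 1
--             current_nums[nums[right]] += 1
--         elif left < n - 1 and current_nums[nums[left]] > 1: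
--             current_nums[nums[left]] -= 1
--             left += 1
--         elif right < n - 1:
--             right += 1
--             current_nums[nums[right]] += 1
--         else:
--             break
--
--     return ans_left, ans_right
-- ===== SOURCE B (Python) =====
-- def solution(nums, n, k):
--     # nxt[i]: position of the next occurrence of nums[i] after i (n if none).
--     nxt = [0] * max(n, 0)
--     last = {}
--     for i in range(n - 1, -1, -1):
--         nxt[i] = last.get(nums[i], n)
--         last[nums[i]] = i
--     min_len, ans_left, ans_right = n, 1, n
--     seen = set()
--     distinct = 0
--     left = 0
--     for r in range(n):
--         if nums[r] not in seen:
--             seen.add(nums[r])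
--             distinct += 1
--         # left: first index whose value does not reoccur within nums[left..r].
--         # Every earlier element reoccurs later in the window, so nums[left..r]
--         # holds the same distinct values as the whole prefix nums[0..r].
--         while nxt[left] <= r:
--             left += 1
--         if distinct == k and r - left + 1 < min_len:
--             min_len, ans_left, ans_right = r - left + 1, left + 1, r + 1
--     return ans_left, ans_right
-- ===== Notes on version B (the rewrite author's own statement) =====
-- stated objective: alternative
-- what changed: A's four-branch while-True pointer machine maintaining a per-window defaultdict of counts and checking every shrink state is replaced by a precomputed next-occurrence table that positions the left boundary directly, with the distinct count taken from a one-way prefix seen-set instead of a maintained window counter; Pre_ excludes only inputs where A raises IndexError (empty nums, or n exceeding len(nums)).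
import Mathlib
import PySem

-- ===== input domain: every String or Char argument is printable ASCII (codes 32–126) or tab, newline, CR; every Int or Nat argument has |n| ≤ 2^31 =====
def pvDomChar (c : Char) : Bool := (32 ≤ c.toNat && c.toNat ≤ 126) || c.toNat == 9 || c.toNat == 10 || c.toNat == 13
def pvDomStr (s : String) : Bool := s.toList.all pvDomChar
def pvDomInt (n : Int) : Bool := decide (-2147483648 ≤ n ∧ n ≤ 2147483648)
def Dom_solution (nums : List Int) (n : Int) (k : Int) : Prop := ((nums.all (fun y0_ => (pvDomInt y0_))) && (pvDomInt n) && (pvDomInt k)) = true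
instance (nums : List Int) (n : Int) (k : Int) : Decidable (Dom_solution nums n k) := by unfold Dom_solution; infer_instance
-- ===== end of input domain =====

-- B replaces A's four-branch while-True pointer machine with its maintained per-window count
-- dict by a precomputed next-occurrence table that positions the left boundary directly and a
-- one-way prefix seen-set for the distinct count (objective: alternative; same value on Pre_).

-- ===== PORT A =====
-- A's `while True` loop; each iteration moves left+right one step, so 2*n.toNat+2 fuel is
-- never exhausted (the equivalence proof needs only fuel ≥ (N-left)+(N-right)).
-- `current_nums[x] += 1` / `-= 1` on the defaultdict(int) is Dict.modify x 0 (·+1)/(·-1);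
-- the branch read `current_nums[nums[left]] > 1` is ported with getD (exact whenever the key
-- is present, which holds on every input Pre_ admits; out of range pyGetD's default is only
-- reached where Python raises IndexError, excluded by Pre_).
def solLoopA (nums : List Int) (n : Int) (k : Int) : Nat → Int → Int →
    PySem.Dict Int Int → Int → Int → Int → Int × Int
  | 0, _, _, _, _, ansL, ansR => (ansL, ansR)
  | fuel + 1, left, right, cnt, minLen, ansL, ansR =>
    let st :=
      if (PySem.Dict.size cnt : Int) = k ∧ right - left + 1 < minLen then
        (right - left + 1, left + 1, right + 1)
      else (minLen, ansL, ansR)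
    if left = right ∧ right < n - 1 then
      solLoopA nums n k fuel left (right + 1)
        (cnt.modify (PySem.List.pyGetD nums (right + 1) 0) 0 (· + 1)) st.1 st.2.1 st.2.2
    else if left < n - 1 ∧ cnt.getD (PySem.List.pyGetD nums left 0) 0 > 1 then
      solLoopA nums n k fuel (left + 1) right
        (cnt.modify (PySem.List.pyGetD nums left 0) 0 (· - 1)) st.1 st.2.1 st.2.2
    else if right < n - 1 then
      solLoopA nums n k fuel left (right + 1)
        (cnt.modify (PySem.List.pyGetD nums (right + 1) 0) 0 (· + 1)) st.1 st.2.1 st.2.2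
    else (st.2.1, st.2.2)

def solution (nums : List Int) (n : Int) (k : Int) : Int × Int :=
  let cnt : PySem.Dict Int Int := (PySem.Dict.empty).insert (PySem.List.pyGetD nums 0 0) 1
  solLoopA nums n k (2 * n.toNat + 2) 0 0 cnt n 1 n

-- ===== PORT B =====
-- backward pass of Source B: nxt[i] = last.get(nums[i], n); last[nums[i]] = i
def solBStep (nums : List Int) (n : Int) (st : List Int × PySem.Dict Int Int) (i : Int) :
    List Int × PySem.Dict Int Int :=
  let v := PySem.List.pyGetD nums i 0
  (PySem.List.pySetD st.1 i (st.2.getD v n), st.2.insert v i)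

def solBNxt (nums : List Int) (n : Int) : List Int :=
  ((PySem.List.pyRange (n - 1) (-1) (-1)).foldl (solBStep nums n)
    (List.replicate (max n 0).toNat 0, PySem.Dict.empty)).1

-- `while nxt[left] <= r: left += 1`; under Pre_ it stops at left ≤ r < n, so n.toNat+1 fuel
-- is never exhausted and pyGetD's default is only reached where Python raises (outside Pre_).
def solAdv (nxt : List Int) (r : Int) : Nat → Int → Int
  | 0, hi => hi
  | fuel + 1, hi =>
    if PySem.List.pyGetD nxt hi 0 ≤ r then solAdv nxt r fuel (hi + 1) else hi

-- loop body of Source B; state = (seen, distinct, left, (min_len, ans_left, ans_right))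
def solBBody (nums : List Int) (n : Int) (k : Int) (nxt : List Int)
    (st : PySem.Set Int × Int × Int × (Int × Int × Int)) (r : Int) :
    PySem.Set Int × Int × Int × (Int × Int × Int) :=
  let x := PySem.List.pyGetD nums r 0
  let sd := if PySem.Set.contains st.1 x then (st.1, st.2.1)
            else (PySem.Set.add st.1 x, st.2.1 + 1)
  let left := solAdv nxt r (n.toNat + 1) st.2.2.1
  let best := if sd.2 = k ∧ r - left + 1 < st.2.2.2.1
              then (r - left + 1, left + 1, r + 1) else st.2.2.2
  (sd.1, sd.2, left, best)

def solution_alt (nums : List Int) (n : Int) (k : Int) : Int × Int :=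
  let nxt := solBNxt nums n
  let res := (PySem.List.pyRange 0 n 1).foldl (solBBody nums n k nxt)
    (PySem.Set.empty, 0, 0, (n, 1, n))
  (res.2.2.2.2.1, res.2.2.2.2.2)

-- ===== PRECONDITION & SPEC =====
-- A raises IndexError on empty nums (it reads nums[0] up front) and whenever n exceeds
-- len(nums) (its pointers reach index n-1); Pre_ excludes exactly those inputs.
def Pre_solution (nums : List Int) (n : Int) (k : Int) : Prop :=
  nums ≠ [] ∧ n ≤ (nums.length : Int)
instance (nums : List Int) (n : Int) (k : Int) : Decidable (Pre_solution nums n k) := by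
  unfold Pre_solution; infer_instance

def pvWitness_solution : List Int × Int × Int := ([1, 2, 1, 3], 4, 2)

def Spec_solution (nums : List Int) (n : Int) (k : Int) (out : Int × Int) : Prop :=
  out = solution_alt nums n k
instance (nums : List Int) (n : Int) (k : Int) (out : Int × Int) :
    Decidable (Spec_solution nums n k out) := by unfold Spec_solution; infer_instance

-- ===== CLAIM (what is proved, stated in full; the proofs are below) =====
def Claim_equal_solution : Prop := ∀ (nums : List Int) (n : Int) (k : Int),
  Dom_solution nums n k → Pre_solution nums n k → Spec_solution nums n k (solution nums n k)

-- ===== LEMMAS AND PROOFS =====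

-- The window nums[j .. r] (inclusive), as a list.
def pvWin (xs : List Int) (j r : Nat) : List Int := (xs.drop j).take (r + 1 - j)

-- The answer-update both programs perform on a candidate window.
def pvUpd (xs : List Int) (k : Int) (best : Int × Int × Int) (j r : Nat) : Int × Int × Int :=
  if ((PySem.Set.ofList (pvWin xs j r)).length : Int) = k ∧ (r : Int) - (j : Int) + 1 < best.1
  then ((r : Int) - (j : Int) + 1, (j : Int) + 1, (r : Int) + 1) else best

-- Reference recursion: A's pointer trajectory expressed over windows.
def pvG (xs : List Int) (k : Int) (N : Nat) (l r : Nat) (best : Int × Int × Int) :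
    Int × Int × Int :=
  let best' := pvUpd xs k best l r
  if h1 : xs.getD l 0 ∈ pvWin xs (l + 1) r ∧ l + 1 < N then pvG xs k N (l + 1) r best'
  else if h2 : r + 1 < N then pvG xs k N l (r + 1) best'
  else best'
termination_by (N - l) + (N - r)
decreasing_by · omega
              · omega

lemma pvWin_nil (xs : List Int) (l r : Nat) (h : r ≤ l) : pvWin xs (l + 1) r = [] := by
  unfold pvWin
  have : r + 1 - (l + 1) = 0 := by omega
  simp [this]

lemma pvWin_cons (xs : List Int) (l r : Nat) (hlr : l ≤ r) (hl : l < xs.length) :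
    pvWin xs l r = xs.getD l 0 :: pvWin xs (l + 1) r := by
  unfold pvWin
  rw [List.drop_eq_getElem_cons hl]
  have h2 : r + 1 - l = (r + 1 - (l + 1)) + 1 := by omega
  rw [h2, List.take_succ_cons]
  rw [List.getD_eq_getElem xs 0 hl]

lemma pvWin_mem_lt (xs : List Int) (l r : Nat) {x : Int} (h : x ∈ pvWin xs (l + 1) r) :
    l < r := by
  by_contra hc
  rw [pvWin_nil xs l r (by omega)] at h
  exact absurd h (List.not_mem_nil)

lemma pvWin_getD_mem (xs : List Int) (a r j : Nat) (ha : a ≤ j) (hj : j ≤ r)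
    (hlen : j < xs.length) : xs.getD j 0 ∈ pvWin xs a r := by
  unfold pvWin
  rw [List.mem_iff_getElem]
  refine ⟨j - a, ?_, ?_⟩
  · rw [List.length_take, List.length_drop]; omega
  · have h1 : a + (j - a) = j := by omega
    rw [List.getD_eq_getElem xs 0 hlen]
    simp [List.getElem_take, List.getElem_drop, h1]

lemma pvWin_mem_exists (xs : List Int) (a r : Nat) (x : Int) (h : x ∈ pvWin xs a r) :
    ∃ j : Nat, a ≤ j ∧ j ≤ r ∧ j < xs.length ∧ xs.getD j 0 = x := by
  unfold pvWin at h
  rw [List.mem_iff_getElem] at h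
  obtain ⟨t, ht, hval⟩ := h
  rw [List.length_take, List.length_drop] at ht
  have hlt : a + t < xs.length := by omega
  refine ⟨a + t, by omega, by omega, hlt, ?_⟩
  rw [List.getD_eq_getElem xs 0 hlt, ← hval]
  simp [List.getElem_take, List.getElem_drop]

lemma pvWin_mem_mono (xs : List Int) (a r : Nat) (v : Int) (h : v ∈ pvWin xs a r) :
    v ∈ pvWin xs a (r + 1) := by
  obtain ⟨j, h1, h2, h3, h4⟩ := pvWin_mem_exists xs a r v h
  exact h4 ▸ pvWin_getD_mem xs a (r + 1) j h1 (by omega) h3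

lemma pvWin_zero (xs : List Int) (r : Nat) : pvWin xs 0 r = xs.take (r + 1) := by
  unfold pvWin; simp

lemma pvSetLen_append (ws : List Int) (x : Int) :
    (PySem.Set.ofList (ws ++ [x])).length =
      if x ∈ ws then (PySem.Set.ofList ws).length else (PySem.Set.ofList ws).length + 1 := by
  rw [PySem.Set.ofList_eq_foldl, List.foldl_append, List.foldl_cons, List.foldl_nil,
    ← PySem.Set.ofList_eq_foldl]
  by_cases hx : x ∈ ws
  · simp [PySem.Set.add, PySem.Set.mem_ofList, hx]
  · simp [PySem.Set.add, PySem.Set.mem_ofList, hx]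

lemma pvSetLen_congr (ws ws' : List Int) (h : ∀ v, v ∈ ws ↔ v ∈ ws') :
    (PySem.Set.ofList ws).length = (PySem.Set.ofList ws').length :=
  ((List.perm_ext_iff_of_nodup (PySem.Set.nodup_ofList ws) (PySem.Set.nodup_ofList ws')).mpr
    (fun a => by rw [PySem.Set.mem_ofList, PySem.Set.mem_ofList]; exact h a)).length_eq

lemma pvDictSize_keys {κ ν : Type} [BEq κ] (d : PySem.Dict κ ν) : d.size = d.keys.length := by
  simp [PySem.Dict.size, PySem.Dict.keys]

-- Step 1: A's fueled loop follows the reference recursion pvG, given that the counter dict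
-- describes the current window.
lemma loopA_eq_G (xs : List Int) (k : Int) (N : Nat) (hlen : N ≤ xs.length) :
    ∀ (fuel : Nat) (l r : Nat) (cnt : PySem.Dict Int Int) (best : Int × Int × Int),
      l ≤ r → r < N → (N - l) + (N - r) ≤ fuel →
      (∀ v, cnt.getD v 0 = ((pvWin xs l r).count v : Int)) →
      (∀ v, cnt.contains v = true ↔ v ∈ pvWin xs l r) →
      cnt.size = (PySem.Set.ofList (pvWin xs l r)).length →
      solLoopA xs (↑N) k fuel ↑l ↑r cnt best.1 best.2.1 best.2.2 =
        ((pvG xs k N l r best).2.1, (pvG xs k N l r best).2.2) := by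
  intro fuel
  induction fuel with
  | zero => intro l r cnt best hlr hrN hfu _ _ _; omega
  | succ f ih =>
    intro l r cnt best hlr hrN hfu hcount hmem hsize
    have hlN : l < N := lt_of_le_of_lt hlr hrN
    have hlxs : l < xs.length := lt_of_lt_of_le hlN hlen
    have hwin : pvWin xs l r = xs.getD l 0 :: pvWin xs (l + 1) r := pvWin_cons xs l r hlr hlxs
    -- the answer update of this iteration is pvUpd
    have hst : (if (PySem.Dict.size cnt : Int) = k ∧ (r : Int) - (l : Int) + 1 < best.1 then
          ((r : Int) - (l : Int) + 1, (l : Int) + 1, (r : Int) + 1)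
        else (best.1, best.2.1, best.2.2)) = pvUpd xs k best l r := by
      rw [pvUpd, hsize]
    rw [solLoopA]
    simp only [hst]
    have hgetl : PySem.List.pyGetD xs (↑l) 0 = xs.getD l 0 := PySem.List.pyGetD_natCast xs l 0
    by_cases hd : xs.getD l 0 ∈ pvWin xs (l + 1) r
    · -- duplicate at the left end: both sides shrink
      have hlr' : l < r := pvWin_mem_lt xs l r hd
      have hb1 : ¬((l : Int) = (r : Int) ∧ (r : Int) < (N : Int) - 1) := by
        rintro ⟨h1, -⟩; omega
      have hcnt1 : cnt.getD (PySem.List.pyGetD xs (↑l) 0) 0 > 1 := by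
        rw [hgetl, hcount, hwin, List.count_cons_self]
        have : 0 < (pvWin xs (l + 1) r).count (xs.getD l 0) := List.count_pos_iff.mpr hd
        omega
      have hb2 : (l : Int) < (N : Int) - 1 ∧ cnt.getD (PySem.List.pyGetD xs (↑l) 0) 0 > 1 :=
        ⟨by omega, hcnt1⟩
      rw [if_neg hb1, if_pos hb2]
      rw [pvG]
      rw [dif_pos ⟨hd, by omega⟩]
      have hcast : ((l : Int) + 1) = ((l + 1 : Nat) : Int) := by push_cast; ring
      rw [hgetl, hcast]
      exact ih (l + 1) r _ (pvUpd xs k best l r) (by omega) hrN (by omega)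
        (by
          intro v
          rw [PySem.Dict.getD_modify]
          by_cases hv : v = xs.getD l 0
          · rw [if_pos hv, hcount, hwin, hv, List.count_cons_self]; push_cast; ring
          · rw [if_neg hv, hcount, hwin, List.count_cons_of_ne (Ne.symm hv)])
        (by
          intro v
          rw [PySem.Dict.contains_modify]
          simp only [Bool.or_eq_true, beq_iff_eq, hmem, hwin, List.mem_cons]
          by_cases hv : v = xs.getD l 0
          · exact ⟨fun _ => by rw [hv]; exact hd, fun _ => Or.inl hv⟩
          · exact ⟨fun h => (h.resolve_left hv).resolve_left hv, fun h => Or.inr (Or.inr h)⟩)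
        (by
          rw [pvDictSize_keys, PySem.Dict.keys_modify, ← pvDictSize_keys]
          have hc : cnt.contains (xs.getD l 0) = true := by rw [hmem, hwin]; exact List.mem_cons_self
          rw [PySem.Dict.size_insert, if_pos hc, hsize]
          exact pvSetLen_congr _ _ (fun v => by
            rw [hwin]
            constructor
            · intro h; rcases List.mem_cons.mp h with h | h
              · subst h; exact hd
              · exact h
            · exact fun h => List.mem_cons_of_mem _ h))
    · -- no duplicate at the left: both sides extend (or stop)
      have hcnt1 : ¬ cnt.getD (PySem.List.pyGetD xs (↑l) 0) 0 > 1 := by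
        rw [hgetl, hcount, hwin, List.count_cons_self]
        have : (pvWin xs (l + 1) r).count (xs.getD l 0) = 0 := by
          by_contra hc
          exact hd (List.count_pos_iff.mp (by omega))
        omega
      have hb2 : ¬((l : Int) < (N : Int) - 1 ∧ cnt.getD (PySem.List.pyGetD xs (↑l) 0) 0 > 1) := by
        rintro ⟨-, h⟩; exact hcnt1 h
      rw [pvG, dif_neg (by rintro ⟨h, -⟩; exact hd h)]
      by_cases hrext : r + 1 < N
      · -- extend
        have hrxs : r + 1 < xs.length := lt_of_lt_of_le hrext hlen
        have hsnoc : pvWin xs l (r + 1) = pvWin xs l r ++ [xs.getD (r + 1) 0] := by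
          unfold pvWin
          have h2 : r + 1 + 1 - l = (r + 1 - l) + 1 := by omega
          rw [h2, List.take_add_one]
          congr 1
          have h4 : l + (r + 1 - l) = r + 1 := by omega
          simp [List.getElem?_drop, h4, List.getElem?_eq_getElem hrxs]
        have hcast : ((r : Int) + 1) = ((r + 1 : Nat) : Int) := by push_cast; ring
        have hgetr : PySem.List.pyGetD xs ((r : Int) + 1) 0 = xs.getD (r + 1) 0 := by
          rw [hcast]; exact PySem.List.pyGetD_natCast xs (r + 1) 0
        have hrec := ih l (r + 1) (cnt.modify (xs.getD (r + 1) 0) 0 (· + 1))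
          (pvUpd xs k best l r) (by omega) hrext (by omega)
          (by
            intro v
            rw [PySem.Dict.getD_modify, hsnoc]
            by_cases hv : v = xs.getD (r + 1) 0
            · rw [if_pos hv, hcount, hv, List.count_append]
              simp
            · rw [if_neg hv, hcount, List.count_append]
              have h0 : List.count v [xs.getD (r + 1) 0] = 0 :=
                List.count_eq_zero.mpr (fun h => hv (List.mem_singleton.mp h))
              rw [h0, Nat.add_zero])
          (by
            intro v
            rw [PySem.Dict.contains_modify, hsnoc]
            simp only [Bool.or_eq_true, beq_iff_eq, hmem, List.mem_append, List.mem_singleton]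
            tauto)
          (by
            rw [pvDictSize_keys, PySem.Dict.keys_modify, ← pvDictSize_keys,
              PySem.Dict.size_insert, hsnoc, pvSetLen_append]
            by_cases hc : xs.getD (r + 1) 0 ∈ pvWin xs l r
            · rw [if_pos ((hmem _).mpr hc), if_pos hc, hsize]
            · rw [if_neg (fun h => hc ((hmem _).mp h)), if_neg hc, hsize])
        rw [dif_pos hrext]
        by_cases hle : l = r
        · rw [if_pos ⟨by omega, by omega⟩, hgetr, hcast]
          exact hrec
        · rw [if_neg (by rintro ⟨h, -⟩; exact hle (by exact_mod_cast h)), if_neg hb2,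
            if_pos (by omega), hgetr, hcast]
          exact hrec
      · -- stop
        rw [dif_neg hrext,
          if_neg (by rintro ⟨-, h⟩; omega), if_neg hb2, if_neg (by omega)]

-- ---- B side ----

-- the backward fold of solBNxt fills nxt so that nxt[i] ≤ r iff nums[i] reoccurs in (i, r]
lemma pvNxtFold (xs : List Int) (N : Nat) :
    ∀ (m : Nat), m ≤ N → ∀ (lst : List Int) (d : PySem.Dict Int Int),
      lst.length = N →
      (∀ (v : Int) (r : Nat), r < N →
        (d.getD v ↑N ≤ ↑r ↔ ∃ j : Nat, m ≤ j ∧ j ≤ r ∧ xs.getD j 0 = v)) →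
      (∀ (i r : Nat), m ≤ i → i < N → r < N →
        (PySem.List.pyGetD lst ↑i 0 ≤ ↑r ↔
          ∃ j : Nat, i < j ∧ j ≤ r ∧ xs.getD j 0 = xs.getD i 0)) →
      ∀ (i r : Nat), i < N → r < N →
        (PySem.List.pyGetD
            (((PySem.List.pyRange ((↑m : Int) - 1) (-1) (-1)).foldl (solBStep xs ↑N) (lst, d)).1)
            ↑i 0 ≤ ↑r ↔
          ∃ j : Nat, i < j ∧ j ≤ r ∧ xs.getD j 0 = xs.getD i 0) := by
  intro m
  induction m with
  | zero =>
    intro _ lst d _ _ hlst i r hiN hrN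
    rw [PySem.List.pyRange_neg_one_eq_nil (by omega), List.foldl_nil]
    exact hlst i r (Nat.zero_le i) hiN hrN
  | succ m ih =>
    intro hmN lst d hlen hd hlst i r hiN hrN
    have hcons : PySem.List.pyRange ((↑(m + 1) : Int) - 1) (-1) (-1) =
        (↑m : Int) :: PySem.List.pyRange ((↑m : Int) - 1) (-1) (-1) := by
      have : ((↑(m + 1) : Int) - 1) = (↑m : Int) := by push_cast; ring
      rw [this, PySem.List.pyRange_neg_one_cons (by omega)]
    rw [hcons, List.foldl_cons]
    have hgetm : PySem.List.pyGetD xs (↑m) 0 = xs.getD m 0 := PySem.List.pyGetD_natCast xs m 0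
    refine ih (by omega) _ _ ?_ ?_ ?_ i r hiN hrN
    · -- length preserved
      simp only [solBStep, PySem.List.pySetD_natCast, List.length_set]
      exact hlen
    · -- dict invariant at m
      intro v r' hr'
      simp only [solBStep, hgetm]
      rw [PySem.Dict.getD_insert]
      by_cases hv : v = xs.getD m 0
      · rw [if_pos hv]
        constructor
        · intro h
          exact ⟨m, le_refl m, by exact_mod_cast h, hv.symm⟩
        · rintro ⟨j, h1, h2, -⟩
          exact_mod_cast le_trans (Nat.cast_le.mpr h1) (Nat.cast_le.mpr h2)
      · rw [if_neg hv, hd v r' hr']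
        constructor
        · rintro ⟨j, h1, h2, h3⟩; exact ⟨j, by omega, h2, h3⟩
        · rintro ⟨j, h1, h2, h3⟩
          refine ⟨j, ?_, h2, h3⟩
          rcases Nat.eq_or_lt_of_le h1 with he | hlt
          · subst he
            exact absurd h3.symm hv
          · omega
    · -- list invariant at m
      intro i' r' hmi' hi'N hr'
      simp only [solBStep]
      rw [PySem.List.pyGetD_pySetD_natCast lst m i' _ 0 (by omega)]
      by_cases hi'm : i' = m
      · rw [if_pos hi'm, hgetm, hd (xs.getD m 0) r' hr']
        subst hi'm
        constructor
        · rintro ⟨j, h1, h2, h3⟩; exact ⟨j, by omega, h2, h3⟩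
        · rintro ⟨j, h1, h2, h3⟩; exact ⟨j, by omega, h2, h3⟩
      · rw [if_neg hi'm]
        exact hlst i' r' (by omega) hi'N hr'

-- interface: B's table tests whether the left element reoccurs inside the window
lemma pvNxt_le_iff (xs : List Int) (N : Nat) (hlen : N ≤ xs.length) (i r : Nat)
    (hir : i ≤ r) (hrN : r < N) :
    (PySem.List.pyGetD (solBNxt xs ↑N) ↑i 0 ≤ ↑r ↔ xs.getD i 0 ∈ pvWin xs (i + 1) r) := by
  unfold solBNxt
  have hmax : (max (↑N : Int) 0).toNat = N := by
    rw [max_eq_left (Int.natCast_nonneg N), Int.toNat_natCast]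
  rw [hmax]
  have hmain := pvNxtFold xs N N (le_refl N) (List.replicate N 0) PySem.Dict.empty
    (by rw [List.length_replicate])
    (by
      intro v r' hr'
      rw [PySem.Dict.getD_empty]
      constructor
      · intro h; exact absurd h (by push_cast; omega)
      · rintro ⟨j, h1, h2, -⟩; omega)
    (by intro i' r' h1 h2 _; omega)
    i r (lt_of_le_of_lt hir hrN) hrN
  rw [hmain]
  constructor
  · rintro ⟨j, h1, h2, h3⟩
    exact h3 ▸ pvWin_getD_mem xs (i + 1) r j (by omega) h2 (by omega)
  · intro h
    obtain ⟨j, h1, h2, h3, h4⟩ := pvWin_mem_exists xs (i + 1) r _ h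
    exact ⟨j, by omega, h2, h4⟩

-- B's while loop lands on the first left index whose value does not recur in the window
lemma pvAdv_spec (nxt xs : List Int) (N : Nat)
    (hnxt : ∀ i r : Nat, i ≤ r → r < N →
      (PySem.List.pyGetD nxt ↑i 0 ≤ ↑r ↔ xs.getD i 0 ∈ pvWin xs (i + 1) r))
    (r : Nat) (hrN : r < N) :
    ∀ (fuel : Nat) (l : Nat), l ≤ r → r + 1 - l ≤ fuel →
      ∃ hi : Nat, solAdv nxt ↑r fuel ↑l = ↑hi ∧ l ≤ hi ∧ hi ≤ r ∧
        xs.getD hi 0 ∉ pvWin xs (hi + 1) r ∧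
        (∀ j, l ≤ j → j < hi → xs.getD j 0 ∈ pvWin xs (j + 1) r) := by
  intro fuel
  induction fuel with
  | zero => intro l h1 h2; omega
  | succ f ih =>
    intro l h1 h2
    rw [solAdv]
    by_cases hc : PySem.List.pyGetD nxt ↑l 0 ≤ ↑r
    · rw [if_pos hc]
      have hdup := (hnxt l r h1 hrN).mp hc
      have hlr : l < r := pvWin_mem_lt xs l r hdup
      have hcast : ((l : Int) + 1) = ((l + 1 : Nat) : Int) := by push_cast; ring
      rw [hcast]
      obtain ⟨hi, heq, hh1, hh2, hh3, hh4⟩ := ih (l + 1) (by omega) (by omega)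
      refine ⟨hi, heq, by omega, hh2, hh3, fun j hj1 hj2 => ?_⟩
      rcases eq_or_lt_of_le hj1 with he | hlt
      · exact he ▸ hdup
      · exact hh4 j (by omega) hj2
    · rw [if_neg hc]
      exact ⟨l, rfl, le_refl l, h1,
        fun hmem => hc ((hnxt l r h1 hrN).mpr hmem),
        fun j hj1 hj2 => absurd hj2 (by omega)⟩

-- dropping a left element that reoccurs keeps the distinct set: the band shares the prefix set
lemma pvWin_prefix_mem (xs : List Int) (r : Nat) :
    ∀ (l : Nat), l ≤ r → r < xs.length →
      (∀ j, j < l → xs.getD j 0 ∈ pvWin xs (j + 1) r) →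
      ∀ v, v ∈ pvWin xs l r ↔ v ∈ pvWin xs 0 r := by
  intro l
  induction l with
  | zero => intro _ _ _ v; exact Iff.rfl
  | succ l ih =>
    intro hlr hrx hdup v
    have hdl := hdup l (by omega)
    have hcons : pvWin xs l r = xs.getD l 0 :: pvWin xs (l + 1) r :=
      pvWin_cons xs l r (by omega) (by omega)
    rw [← ih (by omega) hrx (fun j hj => hdup j (by omega)) v, hcons]
    constructor
    · intro h; exact List.mem_cons_of_mem _ h
    · intro h
      rcases List.mem_cons.mp h with he | h
      · exact he ▸ hdl
      · exact h

-- absorbing an earlier (longer-window) update into the final one of the same stage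
lemma pvUpd_absorb (xs : List Int) (k : Int) (best : Int × Int × Int) (l hi r : Nat)
    (hlhi : l < hi)
    (hcnt : (PySem.Set.ofList (pvWin xs l r)).length =
      (PySem.Set.ofList (pvWin xs hi r)).length) :
    pvUpd xs k (pvUpd xs k best l r) hi r = pvUpd xs k best hi r := by
  unfold pvUpd
  rw [hcnt]
  have hlt : (l : Int) < (hi : Int) := by exact_mod_cast hlhi
  by_cases hin : ((PySem.Set.ofList (pvWin xs hi r)).length : Int) = k ∧
      (r : Int) - (l : Int) + 1 < best.1
  · rw [if_pos hin]
    have hout : ((PySem.Set.ofList (pvWin xs hi r)).length : Int) = k ∧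
        (↑r - ↑hi + 1 : Int) <
          (((↑r - ↑l + 1 : Int), ((↑l + 1 : Int), (↑r + 1 : Int))) : Int × Int × Int).1 := by
      refine ⟨hin.1, ?_⟩
      show (↑r - ↑hi + 1 : Int) < ↑r - ↑l + 1
      omega
    rw [if_pos hout, if_pos ⟨hin.1, by have := hin.2; omega⟩]
  · rw [if_neg hin]

-- one stage of A's trajectory (all windows of one right endpoint) collapses to the single
-- update with the stage's final (shortest) window
lemma pvG_stage (xs : List Int) (k : Int) (N : Nat) :
    ∀ (t l hi r : Nat) (best : Int × Int × Int), hi - l = t → l ≤ hi → hi ≤ r → r < N →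
      N ≤ xs.length →
      xs.getD hi 0 ∉ pvWin xs (hi + 1) r →
      (∀ j, j < hi → xs.getD j 0 ∈ pvWin xs (j + 1) r) →
      pvG xs k N l r best =
        if r + 1 < N then pvG xs k N hi (r + 1) (pvUpd xs k best hi r)
        else pvUpd xs k best hi r := by
  intro t
  induction t with
  | zero =>
    intro l hi r best ht h1 h2 h3 hlen hnd hall
    have hlhi : l = hi := by omega
    subst hlhi
    rw [pvG, dif_neg (fun h => hnd h.1)]
    by_cases hr2 : r + 1 < N
    · rw [dif_pos hr2, if_pos hr2]
    · rw [dif_neg hr2, if_neg hr2]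
  | succ t ihp =>
    intro l hi r best ht h1 h2 h3 hlen hnd hall
    have hlhi : l < hi := by omega
    have hd : xs.getD l 0 ∈ pvWin xs (l + 1) r := hall l hlhi
    rw [pvG, dif_pos ⟨hd, by omega⟩]
    have hcnt : (PySem.Set.ofList (pvWin xs l r)).length =
        (PySem.Set.ofList (pvWin xs hi r)).length := by
      refine pvSetLen_congr _ _ (fun v => ?_)
      rw [pvWin_prefix_mem xs r l (by omega) (by omega) (fun j hj => hall j (by omega)) v,
        pvWin_prefix_mem xs r hi (by omega) (by omega) (fun j hj => hall j hj) v]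
    rw [ihp (l + 1) hi r (pvUpd xs k best l r) (by omega) (by omega) h2 h3 hlen hnd hall]
    by_cases hr2 : r + 1 < N
    · rw [if_pos hr2, if_pos hr2, pvUpd_absorb xs k best l hi r hlhi hcnt]
    · rw [if_neg hr2, if_neg hr2, pvUpd_absorb xs k best l hi r hlhi hcnt]

-- B's main loop from stage r equals the reference recursion pvG
-- B's main loop from stage r equals the reference recursion pvG
lemma pvB_outer (xs : List Int) (k : Int) (N : Nat) (hlen : N ≤ xs.length) (nxt : List Int)
    (hnxt : ∀ i r : Nat, i ≤ r → r < N →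
      (PySem.List.pyGetD nxt ↑i 0 ≤ ↑r ↔ xs.getD i 0 ∈ pvWin xs (i + 1) r)) :
    ∀ (t r l : Nat) (best : Int × Int × Int), N - r = t → l ≤ r → r < N →
      (∀ j : Nat, j < l → xs.getD j 0 ∈ pvWin xs (j + 1) r) →
      ((PySem.List.pyRange ↑r ↑N 1).foldl (solBBody xs ↑N k nxt)
          (PySem.Set.ofList (xs.take r), ((PySem.Set.ofList (xs.take r)).length : Int),
            (↑l : Int), best)).2.2.2 =
        pvG xs k N l r best := by
  intro t
  induction t with
  | zero => intro r l best ht h1 h2 _; omega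
  | succ t ihp =>
    intro r l best ht h1 h2 hinv
    rw [PySem.List.pyRange_one_cons (by exact_mod_cast h2), List.foldl_cons]
    have hrx : r < xs.length := by omega
    have hgetr : PySem.List.pyGetD xs (↑r) 0 = xs.getD r 0 := PySem.List.pyGetD_natCast xs r 0
    have htake : xs.take (r + 1) = xs.take r ++ [xs.getD r 0] := by
      rw [List.take_add_one]
      congr 1
      rw [List.getElem?_eq_getElem hrx, List.getD_eq_getElem xs 0 hrx]
      rfl
    have hsetEq : PySem.Set.ofList (xs.take (r + 1)) =
        PySem.Set.add (PySem.Set.ofList (xs.take r)) (xs.getD r 0) := by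
      rw [htake, PySem.Set.ofList_append_singleton]
    -- the seen/distinct update step
    have hsd : (if PySem.Set.contains (PySem.Set.ofList (xs.take r)) (PySem.List.pyGetD xs (↑r) 0)
          then (PySem.Set.ofList (xs.take r), ((PySem.Set.ofList (xs.take r)).length : Int))
          else (PySem.Set.add (PySem.Set.ofList (xs.take r)) (PySem.List.pyGetD xs (↑r) 0),
            ((PySem.Set.ofList (xs.take r)).length : Int) + 1)) =
        (PySem.Set.ofList (xs.take (r + 1)),
          ((PySem.Set.ofList (xs.take (r + 1))).length : Int)) := by
      rw [hgetr]
      by_cases hm : xs.getD r 0 ∈ PySem.Set.ofList (xs.take r)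
      · rw [if_pos ((PySem.Set.contains_iff _ _).mpr hm), hsetEq, PySem.Set.add_of_mem hm]
      · rw [if_neg (fun h => hm ((PySem.Set.contains_iff _ _).mp h)), hsetEq,
          PySem.Set.add_of_not_mem hm]
        have hlenapp : ((PySem.Set.ofList (xs.take r)) ++ [xs.getD r 0]).length =
            (PySem.Set.ofList (xs.take r)).length + 1 := by
          rw [List.length_append, List.length_singleton]
        rw [hlenapp]
        push_cast
        rfl
    obtain ⟨hi, hadv, hh1, hh2, hh3, hh4⟩ :=
      pvAdv_spec nxt xs N hnxt r h2 (N + 1) l h1 (by omega)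
    have halldup : ∀ j, j < hi → xs.getD j 0 ∈ pvWin xs (j + 1) r := by
      intro j hj
      by_cases hjl : j < l
      · exact hinv j hjl
      · exact hh4 j (by omega) hj
    -- the distinct count of the stage window equals the prefix distinct count
    have hcnt : ((PySem.Set.ofList (xs.take (r + 1))).length : Int) =
        ((PySem.Set.ofList (pvWin xs hi r)).length : Int) := by
      have := pvSetLen_congr (pvWin xs hi r) (pvWin xs 0 r)
        (pvWin_prefix_mem xs r hi hh2 hrx halldup)
      rw [pvWin_zero] at this
      exact_mod_cast this.symm
    -- one loop body application
    have hbody : solBBody xs ↑N k nxt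
        (PySem.Set.ofList (xs.take r), ((PySem.Set.ofList (xs.take r)).length : Int),
          (↑l : Int), best) ↑r =
        (PySem.Set.ofList (xs.take (r + 1)), ((PySem.Set.ofList (xs.take (r + 1))).length : Int),
          (↑hi : Int), pvUpd xs k best hi r) := by
      simp only [solBBody]
      rw [hsd]
      simp only
      rw [Int.toNat_natCast, hadv]
      have hup : pvUpd xs k best hi r =
          (if ((PySem.Set.ofList (xs.take (r + 1))).length : Int) = k ∧
              (↑r : Int) - (↑hi : Int) + 1 < best.1
            then ((↑r : Int) - (↑hi : Int) + 1, (↑hi : Int) + 1, (↑r : Int) + 1) else best) := by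
        unfold pvUpd
        rw [hcnt]
      rw [hup]
    rw [hbody]
    rw [pvG_stage xs k N (hi - l) l hi r best rfl hh1 hh2 h2 hlen hh3 halldup]
    by_cases hr2 : r + 1 < N
    · rw [if_pos hr2]
      have hcast : ((r : Int) + 1) = ((r + 1 : Nat) : Int) := by push_cast; ring
      rw [hcast]
      exact ihp (r + 1) hi (pvUpd xs k best hi r) (by omega) (by omega) hr2
        (fun j hj => pvWin_mem_mono xs (j + 1) r _ (halldup j hj))
    · rw [if_neg hr2]
      have hnil : PySem.List.pyRange ((r : Int) + 1) ↑N 1 = [] :=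
        PySem.List.pyRange_one_eq_nil (by omega)
      rw [hnil, List.foldl_nil]

-- ===== VERDICT (by name: the statement is the Claim_ definition above) =====
theorem solution_spec : Claim_equal_solution := by
  intro nums n k hdom hpre
  unfold Spec_solution
  obtain ⟨hne, hlenI⟩ := hpre
  by_cases hn : n ≤ 0
  · -- n ≤ 0: A breaks at once, B's range is empty; both return (1, n)
    have hA : solution nums n k = (1, n) := by
      simp only [solution]
      rw [Int.toNat_of_nonpos hn]
      show solLoopA nums n k (0 + 2) 0 0 _ n 1 n = (1, n)
      rw [solLoopA]
      split_ifs with h1 h2 h3 h4 <;> first | rfl | omega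
    have hB : solution_alt nums n k = (1, n) := by
      simp only [solution_alt]
      rw [PySem.List.pyRange_one_eq_nil hn, List.foldl_nil]
    rw [hA, hB]
  · push_neg at hn
    set N := n.toNat with hNdef
    have hN : ((N : Nat) : Int) = n := Int.toNat_of_nonneg (le_of_lt hn)
    have hN1 : 1 ≤ N := by omega
    have hlen : N ≤ nums.length := by omega
    have hwin0 : pvWin nums 0 0 = [nums.getD 0 0] := by
      cases nums with
      | nil => exact absurd rfl hne
      | cons a t => simp [pvWin]
    have hget0 : PySem.List.pyGetD nums 0 0 = nums.getD 0 0 :=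
      PySem.List.pyGetD_ofNat' nums 0 0
    -- A's side
    have hA : solution nums n k =
        ((pvG nums k N 0 0 (n, 1, n)).2.1, (pvG nums k N 0 0 (n, 1, n)).2.2) := by
      simp only [solution, hget0]
      rw [← hN]
      exact loopA_eq_G nums k N hlen (2 * ((N : Int)).toNat + 2) 0 0 _ ((↑N : Int), 1, (↑N : Int))
        (le_refl 0) (by omega) (by rw [Int.toNat_natCast]; omega)
        (by
          intro v
          rw [PySem.Dict.getD_insert, hwin0]
          by_cases hv : v = nums.getD 0 0
          · rw [if_pos hv, hv, List.count_cons_self, List.count_nil]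
            norm_num
          · rw [if_neg hv, PySem.Dict.getD_empty]
            have h0 : List.count v [nums.getD 0 0] = 0 :=
              List.count_eq_zero.mpr (fun h => hv (List.mem_singleton.mp h))
            rw [h0]
            rfl)
        (by
          intro v
          rw [PySem.Dict.contains_insert, hwin0]
          simp [PySem.Dict.contains_empty])
        (by
          rw [PySem.Dict.size_insert, if_neg (by simp [PySem.Dict.contains_empty]),
            PySem.Dict.size_empty, hwin0]
          simp [PySem.Set.ofList_eq_foldl, PySem.Set.add])
    -- B's side
    have hB : solution_alt nums n k =
        ((pvG nums k N 0 0 (n, 1, n)).2.1, (pvG nums k N 0 0 (n, 1, n)).2.2) := by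
      simp only [solution_alt]
      rw [← hN]
      have hnxt := fun i r hir hrN => pvNxt_le_iff nums N hlen i r hir hrN
      have hout := pvB_outer nums k N hlen (solBNxt nums ↑N) hnxt N 0 0
        ((↑N : Int), 1, (↑N : Int)) (by omega) (le_refl 0) (by omega) (by intro j hj; omega)
      rw [List.take_zero] at hout
      rw [Nat.cast_zero] at hout
      rw [show ((PySem.Set.ofList ([] : List Int)).length : Int) = 0 from rfl] at hout
      rw [show PySem.Set.ofList ([] : List Int) = PySem.Set.empty from rfl] at hout
      rw [hout]
    rw [hA, hB]
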